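-- pv_equiv track=rewrite | github.com/pauloricca/waves | nodes/node_utils/midi_utils.py | _auto_detect_port
-- ===== SOURCE A (Python) =====
-- def _auto_detect_port(available_ports):
--     """Auto-detect a suitable MIDI port"""
--     if not available_ports:
--         return None
--
--     # Try to find a non-IAC driver port (external controller)
--     for port in available_ports:
--         if 'IAC' not in port:
--             return port
--
--     # Fall back to IAC Driver if available
--     for port in available_ports:
--         if 'IAC' in port:
--             return port
--
--     # Use first available port
--     return available_ports[0]
-- ===== SOURCE B (Python) =====
-- def _auto_detect_port(available_ports):
--     """Auto-detect a suitable MIDI port (single pass)"""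
--     if not available_ports:
--         return None
--     first_non_iac = None
--     first_iac = None
--     for port in available_ports:
--         if 'IAC' not in port:
--             if first_non_iac is None:
--                 first_non_iac = port
--         else:
--             if first_iac is None:
--                 first_iac = port
--     if first_non_iac is not None:
--         return first_non_iac
--     if first_iac is not None:
--         return first_iac
--     return available_ports[0]
-- ===== Notes on version B (the rewrite author's own statement) =====
-- stated objective: alternative
-- what changed: Replaces A's two sequential scans over the list with a single pass that records the first non-IAC port and the first IAC port in separate variables, then picks among them after the loop.
import Mathlib
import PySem

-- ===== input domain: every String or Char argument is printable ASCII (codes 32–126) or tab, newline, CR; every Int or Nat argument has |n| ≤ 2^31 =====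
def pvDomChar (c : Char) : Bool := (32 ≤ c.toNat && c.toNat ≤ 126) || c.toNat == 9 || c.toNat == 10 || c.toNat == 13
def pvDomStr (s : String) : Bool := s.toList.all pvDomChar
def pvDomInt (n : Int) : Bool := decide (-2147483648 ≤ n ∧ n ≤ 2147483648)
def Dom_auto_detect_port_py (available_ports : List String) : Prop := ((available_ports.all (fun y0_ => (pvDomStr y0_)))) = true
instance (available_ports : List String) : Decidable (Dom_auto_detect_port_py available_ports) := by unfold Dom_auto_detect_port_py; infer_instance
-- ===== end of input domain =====

-- B replaces A's two sequential scans with one pass recording the first non-IAC and first IAC port (alternative decomposition, same cost).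


-- ===== PORT A =====
-- first loop of A: return the first port not containing 'IAC'
def aLoop1 : List String → Option String
  | [] => none
  | p :: ps => if PySem.Str.isIn "IAC" p = false then some p else aLoop1 ps

-- second loop of A: return the first port containing 'IAC'
def aLoop2 : List String → Option String
  | [] => none
  | p :: ps => if PySem.Str.isIn "IAC" p = true then some p else aLoop2 ps

def auto_detect_port_py (available_ports : List String) : Option String :=
  if available_ports = [] then none
  else
    match aLoop1 available_ports with
    | some p => some p
    | none =>
      match aLoop2 available_ports with
      | some p => some p
      | none => PySem.List.pyGet? available_ports 0

-- ===== PORT B =====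
def bStep (acc : Option String × Option String) (p : String) : Option String × Option String :=
  if PySem.Str.isIn "IAC" p = false then
    if acc.1 = none then (some p, acc.2) else acc
  else
    if acc.2 = none then (acc.1, some p) else acc

def auto_detect_port_py_alt (available_ports : List String) : Option String :=
  if available_ports = [] then none
  else
    let r := available_ports.foldl bStep (none, none)
    match r.1 with
    | some p => some p
    | none =>
      match r.2 with
      | some p => some p
      | none => PySem.List.pyGet? available_ports 0

-- ===== PRECONDITION & SPEC =====
def Spec_auto_detect_port_py (available_ports : List String) (out : Option String) : Prop := out = auto_detect_port_py_alt available_ports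
instance (available_ports : List String) (out : Option String) : Decidable (Spec_auto_detect_port_py available_ports out) := by unfold Spec_auto_detect_port_py; infer_instance

-- ===== CLAIM (what is proved, stated in full; the proofs are below) =====
def Claim_equal_auto_detect_port_py : Prop := ∀ (available_ports : List String), Dom_auto_detect_port_py available_ports → Spec_auto_detect_port_py available_ports (auto_detect_port_py available_ports)

-- ===== LEMMAS AND PROOFS =====
theorem foldl_bStep (ps : List String) (n i : Option String) :
    ps.foldl bStep (n, i) = (n.orElse (fun _ => aLoop1 ps), i.orElse (fun _ => aLoop2 ps)) := by
  induction ps generalizing n i with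
  | nil => cases n <;> cases i <;> simp [aLoop1, aLoop2]
  | cons p ps ih =>
    simp only [List.foldl_cons, bStep]
    cases h : PySem.Str.isIn "IAC" p <;> cases n <;> cases i <;>
      simp at h <;> simp [ih, aLoop1, aLoop2, h]

-- ===== VERDICT (by name: the statement is the Claim_ definition above) =====
theorem auto_detect_port_py_spec : Claim_equal_auto_detect_port_py := by
  intro ps _
  unfold Spec_auto_detect_port_py auto_detect_port_py auto_detect_port_py_alt
  rw [foldl_bStep]
  simp [Option.orElse]
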